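-- pv_equiv track=rewrite | github.com/GeorgeDoors888/GB-Power-Market-JJ | generate_data_dictionary.py | get_table_category
-- ===== SOURCE A (Python) =====
-- TABLE_CATEGORIES = {
--     'BMRS Historical': ['bmrs_bod', 'bmrs_boalf', 'bmrs_freq', 'bmrs_mid', 'bmrs_costs',
--                         'bmrs_fuelinst', 'bmrs_disbsad', 'bmrs_indgen', 'bmrs_netbsad',
--                         'bmrs_pn', 'bmrs_qpn', 'bmrs_remit', 'bmrs_sysdem', 'bmrs_windfor'],
--     'BMRS Real-time (IRIS)': ['bmrs_bod_iris', 'bmrs_boalf_iris', 'bmrs_freq_iris',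
--                               'bmrs_fuelinst_iris', 'bmrs_indgen_iris'],
--     'P114 Settlement': ['p114_full', 'p114_settlement_canonical', 'elexon_p114_s0142_bpi',
--                         'elexon_p114_s0142_derived'],
--     'NESO Data': ['neso_constraint_breakdown', 'neso_dno_boundaries', 'neso_dno_reference',
--                   'neso_skip_rates_summary', 'obp_physical_notifications'],
--     'DNO & Network': ['duos_unit_rates', 'duos_time_bands', 'constraint_costs_timeline',
--                      'constraint_costs_by_dno', 'constraint_costs_by_dno_latest'],
--     'Generator Data': ['all_generators', 'generator_capacity', 'generator_types'],
--     'VLP Analysis': ['vlp_units', 'vlp_revenue_summary', 'mart_vlp_revenue_p114'],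
--     'Balancing Mechanism': ['balancing_acceptances', 'balancing_dynamic_sel',
--                            'balancing_nonbm_volumes', 'bid_offer_data', 'boalf_with_prices'],
--     'Market Analysis': ['bm_market_kpis', 'bm_kpi_summary', 'generation_mix_complete'],
--     'BESS Data': ['bess_asset_config', 'bess_fr_schedule'],
-- }
--
-- def get_table_category(table_name):
--     """Determine category for a table"""
--     for category, tables in TABLE_CATEGORIES.items():
--         if table_name in tables:
--             return category
--         # Check prefixes
--         if table_name.startswith('bmrs_') and table_name.endswith('_iris'):
--             return 'BMRS Real-time (IRIS)'
--         elif table_name.startswith('bmrs_'):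
--             return 'BMRS Historical'
--         elif table_name.startswith('neso_constraint_breakdown'):
--             return 'NESO Data'
--         elif table_name.startswith('p114_'):
--             return 'P114 Settlement'
--     return 'Other/Views'
-- ===== SOURCE B (Python) =====
-- TABLE_CATEGORIES = {
--     'BMRS Historical': ['bmrs_bod', 'bmrs_boalf', 'bmrs_freq', 'bmrs_mid', 'bmrs_costs',
--                         'bmrs_fuelinst', 'bmrs_disbsad', 'bmrs_indgen', 'bmrs_netbsad',
--                         'bmrs_pn', 'bmrs_qpn', 'bmrs_remit', 'bmrs_sysdem', 'bmrs_windfor'],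
--     'BMRS Real-time (IRIS)': ['bmrs_bod_iris', 'bmrs_boalf_iris', 'bmrs_freq_iris',
--                               'bmrs_fuelinst_iris', 'bmrs_indgen_iris'],
--     'P114 Settlement': ['p114_full', 'p114_settlement_canonical', 'elexon_p114_s0142_bpi',
--                         'elexon_p114_s0142_derived'],
--     'NESO Data': ['neso_constraint_breakdown', 'neso_dno_boundaries', 'neso_dno_reference',
--                   'neso_skip_rates_summary', 'obp_physical_notifications'],
--     'DNO & Network': ['duos_unit_rates', 'duos_time_bands', 'constraint_costs_timeline',
--                      'constraint_costs_by_dno', 'constraint_costs_by_dno_latest'],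
--     'Generator Data': ['all_generators', 'generator_capacity', 'generator_types'],
--     'VLP Analysis': ['vlp_units', 'vlp_revenue_summary', 'mart_vlp_revenue_p114'],
--     'Balancing Mechanism': ['balancing_acceptances', 'balancing_dynamic_sel',
--                            'balancing_nonbm_volumes', 'bid_offer_data', 'boalf_with_prices'],
--     'Market Analysis': ['bm_market_kpis', 'bm_kpi_summary', 'generation_mix_complete'],
--     'BESS Data': ['bess_asset_config', 'bess_fr_schedule'],
-- }
--
-- # inverted index built once: table name -> category
-- LOOKUP = {t: cat for cat, tables in TABLE_CATEGORIES.items() for t in tables}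
--
-- def get_table_category(table_name):
--     """Determine category for a table"""
--     if table_name in LOOKUP:
--         return LOOKUP[table_name]
--     if table_name.startswith('bmrs_') and table_name.endswith('_iris'):
--         return 'BMRS Real-time (IRIS)'
--     if table_name.startswith('bmrs_'):
--         return 'BMRS Historical'
--     if table_name.startswith('neso_constraint_breakdown'):
--         return 'NESO Data'
--     if table_name.startswith('p114_'):
--         return 'P114 Settlement'
--     return 'Other/Views'
-- ===== Notes on version B (the rewrite author's own statement) =====
-- stated objective: idiomatic
-- what changed: B builds an inverted table->category dict once and does a single lookup followed by one flat prefix ladder, replacing A's loop over all categories that re-tests the prefix ladder inside every iteration.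
import Mathlib
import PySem

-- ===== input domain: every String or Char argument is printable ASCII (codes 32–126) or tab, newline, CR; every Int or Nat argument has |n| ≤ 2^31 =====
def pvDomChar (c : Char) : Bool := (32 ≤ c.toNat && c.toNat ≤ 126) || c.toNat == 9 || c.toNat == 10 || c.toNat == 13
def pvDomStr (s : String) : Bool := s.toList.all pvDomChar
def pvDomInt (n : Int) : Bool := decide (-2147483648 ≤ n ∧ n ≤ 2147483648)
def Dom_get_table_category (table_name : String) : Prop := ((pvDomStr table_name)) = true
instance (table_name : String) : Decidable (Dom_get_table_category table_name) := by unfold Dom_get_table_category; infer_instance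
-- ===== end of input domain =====

-- B replaces A's repeated list scans (with the prefix ladder re-tested inside the loop) by a
-- one-time inverted table→category dict plus a single flat prefix ladder (objective: idiomatic).

-- ===== PORT A =====
def pvTableCategories : List (String × List String) :=
  [("BMRS Historical", ["bmrs_bod", "bmrs_boalf", "bmrs_freq", "bmrs_mid", "bmrs_costs",
                        "bmrs_fuelinst", "bmrs_disbsad", "bmrs_indgen", "bmrs_netbsad",
                        "bmrs_pn", "bmrs_qpn", "bmrs_remit", "bmrs_sysdem", "bmrs_windfor"]),
   ("BMRS Real-time (IRIS)", ["bmrs_bod_iris", "bmrs_boalf_iris", "bmrs_freq_iris",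
                              "bmrs_fuelinst_iris", "bmrs_indgen_iris"]),
   ("P114 Settlement", ["p114_full", "p114_settlement_canonical", "elexon_p114_s0142_bpi",
                        "elexon_p114_s0142_derived"]),
   ("NESO Data", ["neso_constraint_breakdown", "neso_dno_boundaries", "neso_dno_reference",
                  "neso_skip_rates_summary", "obp_physical_notifications"]),
   ("DNO & Network", ["duos_unit_rates", "duos_time_bands", "constraint_costs_timeline",
                      "constraint_costs_by_dno", "constraint_costs_by_dno_latest"]),
   ("Generator Data", ["all_generators", "generator_capacity", "generator_types"]),
   ("VLP Analysis", ["vlp_units", "vlp_revenue_summary", "mart_vlp_revenue_p114"]),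
   ("Balancing Mechanism", ["balancing_acceptances", "balancing_dynamic_sel",
                            "balancing_nonbm_volumes", "bid_offer_data", "boalf_with_prices"]),
   ("Market Analysis", ["bm_market_kpis", "bm_kpi_summary", "generation_mix_complete"]),
   ("BESS Data", ["bess_asset_config", "bess_fr_schedule"])]

-- A's for-loop over TABLE_CATEGORIES.items(), with the prefix ladder inside the loop body
def pvLoopA (s : String) : List (String × List String) → String
  | [] => "Other/Views"
  | (category, tables) :: rest =>
    if s ∈ tables then category
    else if PySem.Str.startswith s "bmrs_" && PySem.Str.endswith s "_iris" then "BMRS Real-time (IRIS)"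
    else if PySem.Str.startswith s "bmrs_" then "BMRS Historical"
    else if PySem.Str.startswith s "neso_constraint_breakdown" then "NESO Data"
    else if PySem.Str.startswith s "p114_" then "P114 Settlement"
    else pvLoopA s rest

def get_table_category (table_name : String) : String :=
  pvLoopA table_name pvTableCategories

-- ===== PORT B =====
-- LOOKUP = {t: cat for cat, tables in TABLE_CATEGORIES.items() for t in tables}
def pvLookup : PySem.Dict String String :=
  PySem.Dict.ofList (pvTableCategories.flatMap (fun p => p.2.map (fun t => (t, p.1))))

def get_table_category_alt (table_name : String) : String :=
  match pvLookup.get? table_name with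
  | some c => c
  | none =>
    if PySem.Str.startswith table_name "bmrs_" && PySem.Str.endswith table_name "_iris" then "BMRS Real-time (IRIS)"
    else if PySem.Str.startswith table_name "bmrs_" then "BMRS Historical"
    else if PySem.Str.startswith table_name "neso_constraint_breakdown" then "NESO Data"
    else if PySem.Str.startswith table_name "p114_" then "P114 Settlement"
    else "Other/Views"

-- ===== PRECONDITION & SPEC =====
def Spec_get_table_category (table_name : String) (out : String) : Prop := out = get_table_category_alt table_name
instance (table_name : String) (out : String) : Decidable (Spec_get_table_category table_name out) := by unfold Spec_get_table_category; infer_instance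

-- ===== CLAIM (what is proved, stated in full; the proofs are below) =====
def Claim_equal_get_table_category : Prop := ∀ (table_name : String), Dom_get_table_category table_name → Spec_get_table_category table_name (get_table_category table_name)

-- ===== LEMMAS AND PROOFS =====
def pvAllTables : List String := (pvTableCategories.map Prod.snd).flatten

set_option maxRecDepth 4000 in
theorem pvKeys_eq : pvLookup.keys = pvAllTables := by decide

theorem pv_alt_none (s : String) (hget : PySem.Dict.get? pvLookup s = none) :
    get_table_category_alt s =
    (if PySem.Str.startswith s "bmrs_" && PySem.Str.endswith s "_iris" then "BMRS Real-time (IRIS)"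
     else if PySem.Str.startswith s "bmrs_" then "BMRS Historical"
     else if PySem.Str.startswith s "neso_constraint_breakdown" then "NESO Data"
     else if PySem.Str.startswith s "p114_" then "P114 Settlement"
     else "Other/Views") := by
  unfold get_table_category_alt
  rw [hget]

set_option maxRecDepth 8000 in
set_option maxHeartbeats 4000000 in
theorem pv_eq (s : String) : get_table_category s = get_table_category_alt s := by
  by_cases h : s ∈ pvAllTables
  · fin_cases h <;> rfl
  · have hget : pvLookup.get? s = none := by
      rw [PySem.Dict.get?_eq_none_iff_not_mem_keys, pvKeys_eq]; exact h
    rw [pv_alt_none s hget]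
    simp only [pvAllTables, pvTableCategories, List.map, List.flatten, List.append_eq,
      List.mem_append, not_or] at h
    obtain ⟨h1, h2, h3, h4, h5, h6, h7, h8, h9, h10⟩ := h
    simp only [get_table_category, pvTableCategories, pvLoopA]
    simp only [h1, h2, h3, h4, h5, h6, h7, h8, h9, h10, if_false]
    split_ifs <;> rfl

-- ===== VERDICT (by name: the statement is the Claim_ definition above) =====
theorem get_table_category_spec : Claim_equal_get_table_category := by
  intro s _
  exact pv_eq s
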